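-- pv_equiv track=rewrite | github.com/polirritmico/codesignal_solutions | Python/chessNotation.py | solution
-- ===== SOURCE A (Python) =====
-- def solution(notation: str) -> str:
--     for num in range(1, 9):
--         notation = notation.replace(str(num), "_" * num)
--     original_board_rows = notation.split("/")
--     rotated_board = list(zip(*original_board_rows[::-1]))
--
--     rotated_board_string_rows = list("".join(row) for row in rotated_board)
--     rotated_board_notation = "/".join(rotated_board_string_rows)
--     for num in range(8, 0, -1):
--         rotated_board_notation = rotated_board_notation.replace("_" * num, str(num))
--
--     return rotated_board_notation
-- ===== SOURCE B (Python) =====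
-- def _flush(run: int) -> str:
--     return "8" * (run // 8) + (str(run % 8) if run % 8 else "")
--
--
-- def solution(notation: str) -> str:
--     rows = []
--     for part in notation.split("/"):
--         expanded = ""
--         for ch in part:
--             if "1" <= ch <= "8":
--                 expanded += "_" * (ord(ch) - ord("0"))
--             else:
--                 expanded += ch
--         rows.append(expanded)
--     m = min(map(len, rows))
--     pieces = []
--     for i in range(m):
--         run = 0
--         line = ""
--         for row in reversed(rows):
--             ch = row[i]
--             if ch == "_":
--                 run += 1
--             else:
--                 if run:
--                     line += _flush(run)
--                     run = 0
--                 line += ch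
--         if run:
--             line += _flush(run)
--         pieces.append(line)
--     return "/".join(pieces)
-- ===== Notes on version B (the rewrite author's own statement) =====
-- stated objective: alternative
-- what changed: Replaces A's 16 whole-string .replace passes, split, and zip-of-tuples transpose by a single decompress-per-row step and one index-driven pass that reads each rotated cell from the reversed rows and run-length-encodes empty squares on the fly with a counter.
import Mathlib
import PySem

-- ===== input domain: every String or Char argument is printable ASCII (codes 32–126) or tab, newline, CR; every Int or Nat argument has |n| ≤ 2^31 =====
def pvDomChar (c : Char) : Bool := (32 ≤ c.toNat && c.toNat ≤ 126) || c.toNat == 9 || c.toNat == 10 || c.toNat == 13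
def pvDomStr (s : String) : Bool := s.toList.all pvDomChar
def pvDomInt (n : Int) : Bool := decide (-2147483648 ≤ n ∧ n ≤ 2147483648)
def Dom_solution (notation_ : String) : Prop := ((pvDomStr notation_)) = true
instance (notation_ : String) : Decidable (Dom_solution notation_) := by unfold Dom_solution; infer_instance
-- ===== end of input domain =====

-- B rebuilds the rotated board notation in one index-driven pass with a run-length counter instead of
-- A's sixteen whole-string replace passes and zip transpose; same return value on every input.

-- ===== PORT A =====

def pyZip (ls : List (List Char)) : List (List Char) :=
  if h1 : ls = [] then []
  else if h2 : ls.any (fun r => r.isEmpty) then []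
  else (ls.map (fun r => r.headD ' ')) :: pyZip (ls.map List.tail)
termination_by (ls.headD []).length
decreasing_by
  cases ls with
  | nil => exact absurd rfl h1
  | cons r t =>
    simp only [List.any_cons, Bool.or_eq_true, not_or] at h2
    cases r with
    | nil => simp at h2
    | cons a rt => simp

def solutionCoreA (cs : List Char) : List Char :=
  let expanded := (PySem.List.pyRange 1 9 1).foldl
      (fun acc num => PySem.Chars.replace acc (PySem.Int.toChars num) (List.replicate num.toNat '_')) cs
  let originalBoardRows := PySem.Chars.splitOn expanded ['/']
  let rotatedBoard := pyZip ((PySem.List.slice? originalBoardRows none none (-1)).getD [])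
  let rotatedBoardStringRows := rotatedBoard.map (fun row => PySem.Chars.join [] (row.map (fun c => [c])))
  let rotatedBoardNotation := PySem.Chars.join ['/'] rotatedBoardStringRows
  (PySem.List.pyRange 8 0 (-1)).foldl
      (fun acc num => PySem.Chars.replace acc (List.replicate num.toNat '_') (PySem.Int.toChars num)) rotatedBoardNotation

def solution (notation_ : String) : String := String.ofList (solutionCoreA notation_.toList)

-- ===== PORT B =====

def eChar (c : Char) : List Char :=
  if '1' ≤ c ∧ c ≤ '8' then List.replicate (c.toNat - 48) '_' else [c]

def bFlush (run : Nat) : List Char :=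
  List.replicate (run / 8) '8' ++ (if run % 8 ≠ 0 then PySem.Int.toChars ((run % 8 : Nat) : Int) else [])

def bStep (st : Nat × List Char) (ch : Char) : Nat × List Char :=
  if ch = '_' then (st.1 + 1, st.2)
  else (0, st.2 ++ (if st.1 ≠ 0 then bFlush st.1 else []) ++ [ch])

def bRow (rows : List (List Char)) (i : Int) : List Char :=
  let st := rows.reverse.foldl (fun st row => bStep st (PySem.List.pyGetD row i ' ')) (0, [])
  st.2 ++ (if st.1 ≠ 0 then bFlush st.1 else [])

def solutionCoreB (cs : List Char) : List Char :=
  let rows := (PySem.Chars.splitOn cs ['/']).map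
      (fun part => part.foldl (fun acc c => acc ++ eChar c) [])
  let m := (PySem.List.min? (rows.map List.length) (fun x => x)).getD 0
  let pieces := (PySem.List.pyRange 0 (m : Int) 1).foldl (fun acc i => acc ++ [bRow rows i]) []
  PySem.Chars.join ['/'] pieces

def solution_alt (notation_ : String) : String := String.ofList (solutionCoreB notation_.toList)

-- ===== PRECONDITION & SPEC =====
def Spec_solution (notation_ : String) (out : String) : Prop := out = solution_alt notation_
instance (notation_ : String) (out : String) : Decidable (Spec_solution notation_ out) := by unfold Spec_solution; infer_instance

-- ===== CLAIM (what is proved, stated in full; the proofs are below) =====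
def Claim_equal_solution : Prop := ∀ (notation_ : String), Dom_solution notation_ → Spec_solution notation_ (solution notation_)

-- ===== LEMMAS AND PROOFS =====

def frepl (p v : List Char) : List Char → List Char
  | [] => []
  | c :: t => if p.isPrefixOf (c :: t) then v ++ frepl p v (t.drop (p.length - 1)) else c :: frepl p v t
termination_by l => l.length
decreasing_by
  · simp only [List.length_drop, List.length_cons]; omega
  · simp

theorem replace_go_eq (p v : List Char) (hp : p ≠ []) :
    ∀ (fuel : Nat) (l acc : List Char), l.length ≤ fuel →
      PySem.Chars.replace.go p v fuel l acc = acc.reverse ++ frepl p v l := by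
  intro fuel
  induction fuel with
  | zero =>
    intro l acc hl
    have : l = [] := by cases l <;> simp_all
    subst this
    rw [PySem.Chars.replace.go.eq_def]
    simp [frepl]
  | succ fuel ih =>
    intro l acc hl
    cases l with
    | nil => rw [PySem.Chars.replace.go.eq_def]; simp [frepl]
    | cons c t =>
      rw [PySem.Chars.replace.go.eq_def]
      simp only []
      by_cases hpre : p.isPrefixOf (c :: t) = true
      · rw [if_pos hpre]
        have hplen : 1 ≤ p.length := by cases p <;> simp_all
        have hle : p.length ≤ (c :: t).length := (List.isPrefixOf_iff_prefix.mp hpre).length_le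
        have hdrop : (List.drop p.length (c :: t)) = t.drop (p.length - 1) := by
          cases p with
          | nil => exact absurd rfl hp
          | cons q qs => simp [List.drop]
        rw [ih _ _ (by simp only [List.length_drop, List.length_cons] at *; omega)]
        rw [frepl, if_pos hpre, hdrop]
        simp
      · rw [if_neg hpre]
        rw [ih _ _ (by simp at hl ⊢; omega)]
        rw [frepl, if_neg hpre]
        simp

theorem replace_eq_frepl (s p v : List Char) (hp : p ≠ []) :
    PySem.Chars.replace s p v = frepl p v s := by
  unfold PySem.Chars.replace
  rw [if_neg (by simpa using hp)]
  rw [replace_go_eq p v hp s.length s [] le_rfl]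
  simp

theorem frepl_single (a : Char) (v : List Char) (l : List Char) :
    frepl [a] v l = l.flatMap (fun c => if c = a then v else [c]) := by
  induction l with
  | nil => simp [frepl]
  | cons c t ih =>
    rw [frepl]
    by_cases h : c = a
    · subst h
      rw [if_pos (by simp [List.isPrefixOf])]
      simp [ih]
    · rw [if_neg (by simp [List.isPrefixOf]; exact fun e => h e.symm)]
      simp [ih, h]

theorem frepl_cons_ne {n : Nat} (hn : 1 ≤ n) {c : Char} (hc : c ≠ '_') (d : Char) (t : List Char) :
    frepl (List.replicate n '_') [d] (c :: t) = c :: frepl (List.replicate n '_') [d] t := by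
  rw [frepl, if_neg]
  intro h
  have := List.isPrefixOf_iff_prefix.mp h
  obtain ⟨m, rfl⟩ : ∃ m, n = m + 1 := ⟨n - 1, by omega⟩
  rw [List.replicate_succ] at this
  rcases this with ⟨s, hs⟩
  simp at hs
  exact hc hs.1.symm

theorem prefix_in_left {n : Nat} {a b : List Char}
    (hb : b = [] ∨ ∃ c t, b = c :: t ∧ c ≠ '_')
    (hpre : List.replicate n '_' <+: a ++ b) : List.replicate n '_' <+: a := by
  rcases hb with rfl | ⟨c, t, rfl, hc⟩
  · simpa using hpre
  · by_cases hlen : n ≤ a.length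
    · obtain ⟨s, hs⟩ := hpre
      have h1 : (a ++ c :: t).take n = a.take n := List.take_append_of_le_length hlen
      have h2 : (List.replicate n '_' ++ s).take n = List.replicate n '_' := by
        rw [List.take_append_of_le_length (by simp), List.take_of_length_le (by simp)]
      rw [hs, h1] at h2
      exact h2 ▸ List.take_prefix n a
    · exfalso
      push_neg at hlen
      obtain ⟨s, hs⟩ := hpre
      have e1 : (a ++ c :: t)[a.length]? = some c := by
        rw [List.getElem?_append_right le_rfl]
        simp
      have e2 : (List.replicate n '_' ++ s)[a.length]? = some '_' := by
        rw [List.getElem?_append_left (by simp; omega)]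
        simp [List.getElem?_replicate, hlen]
      rw [hs, e1] at e2
      exact hc (by injection e2)

theorem frepl_append {n : Nat} (hn : 1 ≤ n) (d : Char) (a b : List Char)
    (hb : b = [] ∨ ∃ c t, b = c :: t ∧ c ≠ '_') :
    frepl (List.replicate n '_') [d] (a ++ b)
      = frepl (List.replicate n '_') [d] a ++ frepl (List.replicate n '_') [d] b := by
  suffices H : ∀ (L : Nat) (a : List Char), a.length = L →
      frepl (List.replicate n '_') [d] (a ++ b)
        = frepl (List.replicate n '_') [d] a ++ frepl (List.replicate n '_') [d] b from
    H a.length a rfl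
  intro L
  induction L using Nat.strong_induction_on with
  | _ L ih =>
  intro a hlen
  cases a with
  | nil => simp [frepl]
  | cons x xs =>
    by_cases hpre : (List.replicate n '_').isPrefixOf (x :: xs) = true
    · have hpre2 : (List.replicate n '_').isPrefixOf ((x :: xs) ++ b) = true := by
        rw [List.isPrefixOf_iff_prefix] at hpre ⊢
        exact hpre.trans (List.prefix_append _ _)
      rw [List.cons_append, frepl, if_pos (by simpa using hpre2), frepl, if_pos hpre]
      have hnle : n ≤ xs.length + 1 := by
        have := (List.isPrefixOf_iff_prefix.mp hpre).length_le
        simpa using this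
      have hdrop : (xs ++ b).drop ((List.replicate n '_').length - 1)
          = xs.drop ((List.replicate n '_').length - 1) ++ b := by
        rw [List.drop_append_of_le_length (by simp; omega)]
      rw [hdrop]
      rw [ih (xs.drop ((List.replicate n '_').length - 1)).length (by simp at hlen ⊢; omega) _ rfl]
      simp
    · have hpre2 : ¬ (List.replicate n '_').isPrefixOf ((x :: xs) ++ b) = true := by
        intro h
        exact hpre (List.isPrefixOf_iff_prefix.mpr
          (prefix_in_left hb (List.isPrefixOf_iff_prefix.mp h)))
      rw [List.cons_append, frepl, if_neg (by simpa using hpre2), frepl, if_neg hpre]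
      rw [ih xs.length (by simp at hlen ⊢; omega) _ rfl]
      simp

set_option maxHeartbeats 1000000 in
theorem frepl_run {n : Nat} (hn : 1 ≤ n) (d : Char) (r : Nat) :
    frepl (List.replicate n '_') [d] (List.replicate r '_')
      = List.replicate (r / n) d ++ List.replicate (r % n) '_' := by
  induction r using Nat.strong_induction_on with
  | _ r ih =>
  by_cases hr : r < n
  · cases r with
    | zero => simp [frepl]
    | succ m =>
      have hstep : frepl (List.replicate n '_') [d] (List.replicate (m+1) '_')
          = '_' :: frepl (List.replicate n '_') [d] (List.replicate m '_') := by
        rw [List.replicate_succ, frepl, if_neg]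
        intro h
        have := (List.isPrefixOf_iff_prefix.mp h).length_le
        simp at this
        omega
      rw [hstep, ih m (by omega), Nat.div_eq_of_lt (by omega), Nat.mod_eq_of_lt (by omega),
          Nat.div_eq_of_lt hr, Nat.mod_eq_of_lt hr]
      simp [List.replicate_succ]
  · push_neg at hr
    have hsplit : List.replicate r '_' = List.replicate n '_' ++ List.replicate (r - n) '_' := by
      rw [← List.replicate_add]; congr 1; omega
    obtain ⟨m, hm⟩ : ∃ m, n = m + 1 := ⟨n - 1, by omega⟩
    have hcons : List.replicate r '_' = '_' :: List.replicate (r - 1) '_' := by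
      cases r with
      | zero => omega
      | succ q => simp [List.replicate_succ]
    rw [hcons, frepl, if_pos]
    · have hdrop : (List.replicate (r-1) '_').drop ((List.replicate n '_').length - 1)
          = List.replicate (r - n) '_' := by
        rw [List.length_replicate, List.drop_replicate]
        congr 1; omega
      rw [hdrop, ih (r - n) (by omega)]
      have h1 : (r - n) / n + 1 = r / n := by
        obtain ⟨s, rfl⟩ : ∃ s, r = s + n := ⟨r - n, by omega⟩
        rw [Nat.add_sub_cancel, Nat.add_div_right _ (by omega)]
      have h2 : (r - n) % n = r % n := by
        obtain ⟨s, rfl⟩ : ∃ s, r = s + n := ⟨r - n, by omega⟩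
        rw [Nat.add_sub_cancel, Nat.add_mod_right]
      rw [h2, ← h1]
      simp [List.replicate_succ]
    · rw [List.isPrefixOf_iff_prefix, hcons.symm, hsplit]
      exact List.prefix_append _ _

def fN (n : Nat) : List Char → List Char := frepl (List.replicate n '_') [Nat.digitChar n]

def upTo (k : Nat) : List Nat := (List.range k).map (· + 1)

def chain (ns : List Nat) (l : List Char) : List Char := ns.foldr (fun n acc => fN n acc) l

theorem digitChar_ne_underscore {n : Nat} (h : n ≤ 8) : Nat.digitChar n ≠ '_' := by
  interval_cases n <;> decide

theorem chain_nil (ns : List Nat) : chain ns [] = [] := by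
  induction ns with
  | nil => rfl
  | cons n ns ih => simp only [chain, List.foldr] at ih ⊢; rw [ih]; simp [fN, frepl]

theorem chain_cons_ne (ns : List Nat) (hns : ∀ n ∈ ns, 1 ≤ n) {c : Char} (hc : c ≠ '_')
    (t : List Char) : chain ns (c :: t) = c :: chain ns t := by
  induction ns with
  | nil => rfl
  | cons n ns ih =>
    simp only [chain, List.foldr] at ih ⊢
    rw [ih (fun m hm => hns m (by simp [hm]))]
    exact frepl_cons_ne (hns n (by simp)) hc _ _

theorem chain_rep_ne (ns : List Nat) (hns : ∀ n ∈ ns, 1 ≤ n) {c : Char} (hc : c ≠ '_')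
    (k : Nat) (z : List Char) :
    chain ns (List.replicate k c ++ z) = List.replicate k c ++ chain ns z := by
  induction k with
  | zero => simp
  | succ m ih =>
    rw [List.replicate_succ, List.cons_append, chain_cons_ne ns hns hc, ih, ← List.cons_append,
        ← List.replicate_succ]

theorem fN_split {n : Nat} (hn : 1 ≤ n) {c : Char} (hc : c ≠ '_') (a b : List Char) :
    fN n (a ++ c :: b) = fN n a ++ c :: fN n b := by
  unfold fN
  rw [frepl_append hn _ a (c :: b) (Or.inr ⟨c, b, rfl, hc⟩), frepl_cons_ne hn hc]

theorem chain_split (ns : List Nat) (hns : ∀ n ∈ ns, 1 ≤ n) {c : Char} (hc : c ≠ '_')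
    (a b : List Char) : chain ns (a ++ c :: b) = chain ns a ++ c :: chain ns b := by
  induction ns with
  | nil => rfl
  | cons n ns ih =>
    simp only [chain, List.foldr] at ih ⊢
    rw [ih (fun m hm => hns m (by simp [hm]))]
    exact fN_split (hns n (by simp)) hc _ _

theorem upTo_mem (k : Nat) : ∀ n ∈ upTo k, 1 ≤ n := by
  intro n hn
  simp only [upTo, List.mem_map, List.mem_range] at hn
  omega

theorem chain_append_chain (ns ms : List Nat) (l : List Char) :
    chain (ns ++ ms) l = chain ns (chain ms l) := by
  simp [chain, List.foldr_append]

theorem upTo_succ (k : Nat) : upTo (k + 1) = upTo k ++ [k + 1] := by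
  simp [upTo, List.range_succ]

theorem chain_run_small (k : Nat) (hk : k ≤ 7) (j : Nat) (hj : j ≤ k) :
    chain (upTo k) (List.replicate j '_')
      = if j = 0 then [] else [Nat.digitChar j] := by
  induction k generalizing j with
  | zero =>
    have : j = 0 := by omega
    subst this
    simp [chain_nil]
  | succ k ih =>
    rw [upTo_succ, chain_append_chain]
    show chain (upTo k) (fN (k+1) (List.replicate j '_')) = _
    unfold fN
    rw [frepl_run (by omega)]
    by_cases hje : j = k + 1
    · subst hje
      rw [Nat.div_self (by omega), Nat.mod_self]
      simp only [List.replicate_one, List.replicate_zero, List.append_nil]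
      rw [chain_cons_ne _ (upTo_mem k) (digitChar_ne_underscore (by omega)), chain_nil]
      rw [if_neg (by omega)]
    · have hlt : j < k + 1 := by omega
      rw [Nat.div_eq_of_lt hlt, Nat.mod_eq_of_lt hlt]
      simp only [List.replicate_zero, List.nil_append]
      exact ih (by omega) j (by omega)

theorem chain8_run (r : Nat) : chain (upTo 8) (List.replicate r '_') = bFlush r := by
  rw [upTo_succ, chain_append_chain]
  show chain (upTo 7) (fN 8 (List.replicate r '_')) = _
  unfold fN
  rw [frepl_run (by omega)]
  rw [show Nat.digitChar 8 = '8' from rfl]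
  rw [chain_rep_ne _ (upTo_mem 7) (by decide)]
  rw [chain_run_small 7 (by omega) (r % 8) (by omega)]
  unfold bFlush
  congr 1
  have h8 : r % 8 < 8 := Nat.mod_lt _ (by omega)
  set j := r % 8 with hj
  interval_cases j <;> decide

theorem compress_eq_chain (x : List Char) :
    (PySem.List.pyRange 8 0 (-1)).foldl
      (fun acc num => PySem.Chars.replace acc (List.replicate num.toNat '_') (PySem.Int.toChars num)) x
    = chain (upTo 8) x := by
  have hr : PySem.List.pyRange 8 0 (-1) = [8,7,6,5,4,3,2,1] := by decide
  have hu : upTo 8 = [1,2,3,4,5,6,7,8] := by decide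
  have e : ∀ (k : Nat) (i : Int) (y : List Char), i.toNat = k →
      PySem.Int.toChars i = [Nat.digitChar k] → 1 ≤ k →
      PySem.Chars.replace y (List.replicate i.toNat '_') (PySem.Int.toChars i) = fN k y := by
    intro k i y h1 h2 hk
    rw [replace_eq_frepl _ _ _ (by simp [h1]; omega), h1, h2]
    rfl
  rw [hr, hu]
  simp only [List.foldl, chain, List.foldr]
  rw [e 8 8 _ (by decide) (by decide) (by omega), e 7 7 _ (by decide) (by decide) (by omega),
      e 6 6 _ (by decide) (by decide) (by omega), e 5 5 _ (by decide) (by decide) (by omega),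
      e 4 4 _ (by decide) (by decide) (by omega), e 3 3 _ (by decide) (by decide) (by omega),
      e 2 2 _ (by decide) (by decide) (by omega), e 1 1 _ (by decide) (by decide) (by omega)]

def split1 (sep : Char) : List Char → List (List Char)
  | [] => [[]]
  | c :: t => if c = sep then [] :: split1 sep t else (split1 sep t).modifyHead (c :: ·)

theorem split1_ne_nil (sep : Char) (l : List Char) : split1 sep l ≠ [] := by
  induction l with
  | nil => simp [split1]
  | cons c t ih =>
    simp only [split1]
    split_ifs
    · simp
    · cases h : split1 sep t with
      | nil => exact absurd h ih
      | cons a b => simp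

theorem splitOn_go_eq (sep : Char) :
    ∀ (fuel : Nat) (l cur : List Char) (acc : List (List Char)), l.length < fuel →
      PySem.Chars.splitOn.go [sep] fuel l cur acc
        = acc.reverse ++ (split1 sep l).modifyHead (cur.reverse ++ ·) := by
  intro fuel
  induction fuel with
  | zero => intro l cur acc hl; omega
  | succ fuel ih =>
    intro l cur acc hl
    cases l with
    | nil => rw [PySem.Chars.splitOn.go.eq_def]; simp [split1]
    | cons c t =>
      rw [PySem.Chars.splitOn.go.eq_def]
      simp only []
      by_cases h : c = sep
      · subst h
        rw [if_pos (by simp [List.isPrefixOf])]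
        rw [ih _ _ _ (by simp at hl ⊢; omega)]
        simp only [List.drop_succ_cons, List.drop_zero, List.reverse_cons, split1, if_pos rfl]
        obtain ⟨h1, t1, e⟩ := List.exists_cons_of_ne_nil (split1_ne_nil c t)
        rw [e]
        simp [e]
      · rw [if_neg (by simp [List.isPrefixOf]; exact fun e => h e.symm)]
        rw [ih _ _ _ (by simp at hl ⊢; omega)]
        simp only [split1, if_neg h]
        obtain ⟨h1, t1, e⟩ := List.exists_cons_of_ne_nil (split1_ne_nil sep t)
        rw [e]
        simp

theorem splitOn_eq_split1 (l : List Char) (sep : Char) :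
    PySem.Chars.splitOn l [sep] = split1 sep l := by
  unfold PySem.Chars.splitOn
  rw [splitOn_go_eq sep _ _ _ _ (by omega)]
  obtain ⟨h1, t1, e⟩ := List.exists_cons_of_ne_nil (split1_ne_nil sep l)
  rw [e]
  simp

theorem split1_append_no_sep (sep : Char) (a z : List Char) (ha : ∀ x ∈ a, x ≠ sep) :
    split1 sep (a ++ z) = (split1 sep z).modifyHead (a ++ ·) := by
  induction a with
  | nil =>
    obtain ⟨h1, t1, e⟩ := List.exists_cons_of_ne_nil (split1_ne_nil sep z)
    rw [e]; simp [e]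
  | cons c t ih =>
    have hc : c ≠ sep := ha c (by simp)
    simp only [List.cons_append, split1, if_neg hc]
    rw [ih (fun x hx => ha x (by simp [hx]))]
    obtain ⟨h1, t1, e⟩ := List.exists_cons_of_ne_nil (split1_ne_nil sep z)
    rw [e]
    simp

theorem split1_flatMap (l : List Char) :
    split1 '/' (l.flatMap eChar) = (split1 '/' l).map (fun r => r.flatMap eChar) := by
  induction l with
  | nil => simp [split1]
  | cons c t ih =>
    by_cases h : c = '/'
    · subst h
      have : eChar '/' = ['/'] := by decide
      simp only [List.flatMap_cons, this, List.singleton_append, split1, if_pos rfl]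
      simp [ih]
    · have hne : ∀ x ∈ eChar c, x ≠ '/' := by
        intro x hx
        simp only [eChar] at hx
        split_ifs at hx
        · rw [List.eq_of_mem_replicate hx]; decide
        · simp at hx; subst hx; exact h
      simp only [List.flatMap_cons]
      rw [split1_append_no_sep _ _ _ hne, ih]
      simp only [split1, if_neg h]
      obtain ⟨h1, t1, e⟩ := List.exists_cons_of_ne_nil (split1_ne_nil '/' t)
      rw [e]
      simp

theorem char_not_digit18 {c : Char} (h1 : c ≠ '1') (h2 : c ≠ '2') (h3 : c ≠ '3') (h4 : c ≠ '4')
    (h5 : c ≠ '5') (h6 : c ≠ '6') (h7 : c ≠ '7') (h8 : c ≠ '8') : ¬ ('1' ≤ c ∧ c ≤ '8') := by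
  rintro ⟨ha, hb⟩
  have hv1 : 49 ≤ c.toNat := ha
  have hv2 : c.toNat ≤ 56 := hb
  have inj : ∀ {d : Char}, c.toNat = d.toNat → c = d := fun h => Char.ext (UInt32.toNat_inj.mp h)
  interval_cases h : c.toNat <;>
    first
      | exact h1 (inj (d := '1') (by decide))
      | exact h2 (inj (d := '2') (by decide))
      | exact h3 (inj (d := '3') (by decide))
      | exact h4 (inj (d := '4') (by decide))
      | exact h5 (inj (d := '5') (by decide))
      | exact h6 (inj (d := '6') (by decide))
      | exact h7 (inj (d := '7') (by decide))
      | exact h8 (inj (d := '8') (by decide))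

theorem expand_eq_flatMap (cs : List Char) :
    (PySem.List.pyRange 1 9 1).foldl
      (fun acc num => PySem.Chars.replace acc (PySem.Int.toChars num) (List.replicate num.toNat '_')) cs
    = cs.flatMap eChar := by
  have hr : PySem.List.pyRange 1 9 1 = [1,2,3,4,5,6,7,8] := by decide
  have e : ∀ (k : Nat) (i : Int) (y : List Char), i.toNat = k → PySem.Int.toChars i = [Nat.digitChar k] →
      PySem.Chars.replace y (PySem.Int.toChars i) (List.replicate i.toNat '_')
        = y.flatMap (fun c => if c = Nat.digitChar k then List.replicate k '_' else [c]) := by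
    intro k i y h1 h2
    rw [h2, replace_eq_frepl _ _ _ (by simp), frepl_single, h1]
  rw [hr]
  simp only [List.foldl]
  rw [e 1 1 _ (by decide) (by decide), e 2 2 _ (by decide) (by decide), e 3 3 _ (by decide) (by decide),
      e 4 4 _ (by decide) (by decide), e 5 5 _ (by decide) (by decide), e 6 6 _ (by decide) (by decide),
      e 7 7 _ (by decide) (by decide), e 8 8 _ (by decide) (by decide)]
  rw [List.flatMap_assoc, List.flatMap_assoc, List.flatMap_assoc, List.flatMap_assoc,
      List.flatMap_assoc, List.flatMap_assoc, List.flatMap_assoc]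
  apply List.flatMap_congr
  intro c _
  by_cases hc1 : c = '1'
  · subst hc1; decide
  by_cases hc2 : c = '2'
  · subst hc2; decide
  by_cases hc3 : c = '3'
  · subst hc3; decide
  by_cases hc4 : c = '4'
  · subst hc4; decide
  by_cases hc5 : c = '5'
  · subst hc5; decide
  by_cases hc6 : c = '6'
  · subst hc6; decide
  by_cases hc7 : c = '7'
  · subst hc7; decide
  by_cases hc8 : c = '8'
  · subst hc8; decide
  have hnd := char_not_digit18 hc1 hc2 hc3 hc4 hc5 hc6 hc7 hc8
  simp [show Nat.digitChar 1 = '1' from by decide, show Nat.digitChar 2 = '2' from by decide, show Nat.digitChar 3 = '3' from by decide, show Nat.digitChar 4 = '4' from by decide, show Nat.digitChar 5 = '5' from by decide, show Nat.digitChar 6 = '6' from by decide, show Nat.digitChar 7 = '7' from by decide, show Nat.digitChar 8 = '8' from by decide, eChar, hc1, hc2, hc3, hc4, hc5, hc6, hc7, hc8, hnd]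

theorem chain8_intercalate (parts : List (List Char)) :
    chain (upTo 8) (List.intercalate ['/'] parts)
      = List.intercalate ['/'] (parts.map (chain (upTo 8))) := by
  induction parts with
  | nil => simp [List.intercalate, chain_nil]
  | cons p rest ih =>
    cases rest with
    | nil => simp [List.intercalate]
    | cons q rest2 =>
      have h1 : List.intercalate ['/'] (p :: q :: rest2) = p ++ '/' :: List.intercalate ['/'] (q :: rest2) := by
        simp [List.intercalate, List.intersperse]
      have h2 : List.intercalate ['/'] ((p :: q :: rest2).map (chain (upTo 8)))
          = chain (upTo 8) p ++ '/' :: List.intercalate ['/'] ((q :: rest2).map (chain (upTo 8))) := by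
        simp [List.intercalate, List.intersperse]
      rw [h1, h2, chain_split _ (upTo_mem 8) (by decide), ih]

theorem flushIf_eq (r : Nat) : (if r ≠ 0 then bFlush r else []) = bFlush r := by
  by_cases h : r = 0
  · subst h; simp [bFlush]
  · rw [if_pos h]

theorem bLoop_eq (l : List Char) : ∀ (run : Nat) (acc : List Char),
    (l.foldl bStep (run, acc)).2
        ++ (if (l.foldl bStep (run, acc)).1 ≠ 0 then bFlush (l.foldl bStep (run, acc)).1 else [])
      = acc ++ chain (upTo 8) (List.replicate run '_' ++ l) := by
  induction l with
  | nil =>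
    intro run acc
    simp only [List.foldl_nil, List.append_nil]
    rw [flushIf_eq, ← chain8_run]
  | cons c t ih =>
    intro run acc
    by_cases hc : c = '_'
    · subst hc
      simp only [List.foldl_cons]
      rw [show bStep (run, acc) '_' = (run + 1, acc) from by simp [bStep]]
      rw [ih (run + 1) acc]
      congr 2
      rw [List.replicate_succ', List.append_assoc]
      simp
    · simp only [List.foldl_cons]
      rw [show bStep (run, acc) c = (0, acc ++ (if run ≠ 0 then bFlush run else []) ++ [c]) from by
        simp [bStep, hc]]
      rw [ih 0 _]
      rw [chain_split _ (upTo_mem 8) hc, chain8_run, flushIf_eq]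
      simp [List.replicate_zero]

theorem getD_zero_headD (r : List Char) : r.getD 0 ' ' = r.headD ' ' := by
  cases r <;> simp

theorem pyZip_eq (m : Nat) : ∀ (ls : List (List Char)), ls ≠ [] →
    (∀ r ∈ ls, m ≤ r.length) → (∃ r ∈ ls, r.length = m) →
    pyZip ls = (List.range m).map (fun i => ls.map (fun r => r.getD i ' ')) := by
  induction m with
  | zero =>
    intro ls hne hmin ⟨r, hr, hrlen⟩
    rw [pyZip.eq_def, dif_neg hne, dif_pos]
    · simp
    · simp only [List.any_eq_true]
      exact ⟨r, hr, by simp [List.isEmpty_iff, ← List.length_eq_zero_iff, hrlen]⟩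
  | succ m ih =>
    intro ls hne hmin hex
    have hno : ¬ ls.any (fun r => r.isEmpty) = true := by
      simp only [List.any_eq_true, not_exists]
      rintro r ⟨hr, hemp⟩
      rw [List.isEmpty_iff] at hemp
      subst hemp
      have h1 := hmin [] hr
      simp at h1
    have hnonempty : ∀ r ∈ ls, r ≠ [] := by
      intro r hr h
      subst h
      have := hmin [] hr
      simp at this
    rw [pyZip.eq_def, dif_neg hne, dif_neg hno]
    rw [ih (ls.map List.tail) (by simpa using hne)
      (by
        intro r hr
        simp only [List.mem_map] at hr
        obtain ⟨r0, hr0, rfl⟩ := hr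
        have := hmin r0 hr0
        simp only [List.length_tail]
        omega)
      (by
        obtain ⟨r, hr, hrlen⟩ := hex
        exact ⟨r.tail, List.mem_map.mpr ⟨r, hr, rfl⟩, by simp [List.length_tail, hrlen]⟩)]
    rw [List.range_succ_eq_map, List.map_cons]
    congr 1
    · apply List.map_congr_left
      intro r _
      exact (getD_zero_headD r).symm
    · rw [List.map_map]
      apply List.map_congr_left
      intro i _
      rw [List.map_map]
      apply List.map_congr_left
      intro r hr
      have hne2 := hnonempty r hr
      cases r with
      | nil => exact absurd rfl hne2
      | cons a rt => simp

theorem core_eq (cs : List Char) : solutionCoreA cs = solutionCoreB cs := by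
  simp only [solutionCoreA, solutionCoreB]
  rw [compress_eq_chain, expand_eq_flatMap, splitOn_eq_split1, split1_flatMap,
      splitOn_eq_split1, PySem.List.slice?_none_none_neg_one]
  simp only [Option.getD_some]
  have hrowB : (split1 '/' cs).map (fun part => part.foldl (fun acc c => acc ++ eChar c) [])
      = (split1 '/' cs).map (fun r => r.flatMap eChar) :=
    List.map_congr_left (fun part _ => by
      simpa using PySem.List.foldl_append_eq_flatMap eChar part [])
  rw [hrowB]
  set rows := (split1 '/' cs).map (fun r => r.flatMap eChar) with hrows
  have hrne : rows ≠ [] := by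
    rw [hrows]
    intro h
    rw [List.map_eq_nil_iff] at h
    exact split1_ne_nil '/' cs h
  obtain ⟨m, hm⟩ : ∃ m, PySem.List.min? (rows.map List.length) (fun x => x) = some m := by
    cases h : PySem.List.min? (rows.map List.length) (fun x => x) with
    | none =>
      rw [PySem.List.min?_eq_none_iff, List.map_eq_nil_iff] at h
      exact absurd h hrne
    | some m => exact ⟨m, rfl⟩
  rw [hm]
  simp only [Option.getD_some]
  have hcond1 : ∀ r ∈ rows.reverse, m ≤ r.length := by
    intro r hr
    exact PySem.List.min?_isMin hm _ (List.mem_map.mpr ⟨r, List.mem_reverse.mp hr, rfl⟩)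
  have hcond2 : ∃ r ∈ rows.reverse, r.length = m := by
    obtain ⟨r, hr, hrl⟩ := List.mem_map.mp (PySem.List.min?_mem hm)
    exact ⟨r, List.mem_reverse.mpr hr, hrl⟩
  rw [pyZip_eq m rows.reverse (by simpa using hrne) hcond1 hcond2]
  have hsingle : ((List.range m).map (fun i => rows.reverse.map (fun r => r.getD i ' '))).map
        (fun row => PySem.Chars.join [] (row.map (fun c => [c])))
      = (List.range m).map (fun i => rows.reverse.map (fun r => r.getD i ' ')) := by
    rw [List.map_map]
    apply List.map_congr_left
    intro i _
    exact PySem.Chars.join_nil_singletons _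
  rw [hsingle]
  have hjoin : ∀ parts : List (List Char), PySem.Chars.join ['/'] parts = List.intercalate ['/'] parts :=
    fun _ => rfl
  rw [hjoin, chain8_intercalate, hjoin]
  congr 1
  rw [PySem.List.foldl_append_singleton_eq_map (fun i => bRow rows i)]
  rw [PySem.List.pyRange_zero_nat m]
  simp only [List.map_map, List.nil_append]
  apply List.map_congr_left
  intro k _
  simp only [Function.comp]
  simp only [bRow]
  rw [← List.foldl_map (f := fun row => PySem.List.pyGetD row ((k : Nat) : Int) ' ') (g := bStep)]
  have hcol : rows.reverse.map (fun row => PySem.List.pyGetD row ((k : Nat) : Int) ' ')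
      = rows.reverse.map (fun r => r.getD k ' ') :=
    List.map_congr_left (fun r _ => PySem.List.pyGetD_natCast r k ' ')
  rw [hcol, bLoop_eq _ 0 []]
  simp

-- ===== VERDICT (by name: the statement is the Claim_ definition above) =====
theorem solution_spec : Claim_equal_solution := by
  intro notation_ _
  unfold Spec_solution solution solution_alt
  rw [core_eq]
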